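-- pv_equiv track=rewrite | github.com/tcoulvert/UTBEQuantumWalk | main.py | generate_photon_outcomes
-- ===== SOURCE A (Python) =====
-- def generate_photon_outcomes(N, max_photons=2):
--
--     '''Helper function to create a label for the possible
--     detection probabilities of max_photons across N modes.
--
--     For example, if N=3 and max_photons=2, we expect outcomes to be:
--     {(0,0,0), (0,0,1), (0,1,0), (1,0,0), (0,1,1), (1,1,0), (1,0,1), (2,0,0),
--     (0,2,0), (0,0,2)}
--
--     Input
--
--     int N:             Number of detection modes
--     int max_photons:   Maximum number of photons detectable across the N modes
--
--     Output
--
--     list outcomes:     List of N-tuples which are the detection labels.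
--
--     '''
--
--     outcomes = []
--
--     def generate_outcomes_helper(current_outcome, remaining_photons, current_mode):
--         if current_mode == N:
--             if remaining_photons >= 0:
--                 outcomes.append(tuple(current_outcome))
--             return None
--
--
--         for photons_in_mode in range(min(max_photons + 1, remaining_photons + 1)):
--             new_outcome = current_outcome + [photons_in_mode]
--             generate_outcomes_helper(new_outcome, remaining_photons - photons_in_mode, current_mode + 1)
--
--     generate_outcomes_helper([], max_photons, 0)
--     return outcomes
-- ===== SOURCE B (Python) =====
-- def generate_photon_outcomes(N, max_photons=2):
--     rows = [()]
--     for _ in range(N):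
--         if not rows:
--             break
--         rows = [t + (p,) for t in rows for p in range(max_photons - sum(t) + 1)]
--     return [t for t in rows if sum(t) <= max_photons]
-- ===== Notes on version B (the rewrite author's own statement) =====
-- stated objective: alternative
-- what changed: Replaces the nested recursive depth-first backtracking helper mutating an outer outcomes list with an iterative breadth-first expansion: a loop that rebuilds the list of partial tuples level by level via a comprehension, followed by a final filtering comprehension.
import Mathlib
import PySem

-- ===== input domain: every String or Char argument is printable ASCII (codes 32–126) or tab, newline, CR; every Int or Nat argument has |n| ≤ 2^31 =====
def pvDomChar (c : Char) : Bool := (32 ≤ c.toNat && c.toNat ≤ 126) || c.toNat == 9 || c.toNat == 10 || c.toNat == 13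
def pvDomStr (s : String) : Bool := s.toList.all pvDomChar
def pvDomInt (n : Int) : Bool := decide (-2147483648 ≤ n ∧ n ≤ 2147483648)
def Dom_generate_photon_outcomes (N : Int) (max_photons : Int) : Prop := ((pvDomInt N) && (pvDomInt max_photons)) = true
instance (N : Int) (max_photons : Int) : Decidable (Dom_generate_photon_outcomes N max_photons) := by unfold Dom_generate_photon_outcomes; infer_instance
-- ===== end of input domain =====

-- B replaces A's recursive depth-first backtracking with an iterative breadth-first level
-- expansion; only the RETURN value is compared (A also mutates no argument).

-- ===== PORT A =====
-- Python's recursion on current_mode reaching N is rendered as structural recursion on the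
-- remaining number of modes (N - current_mode).toNat, exact wherever the Python returns
-- (the excluded N < 0 ∧ 0 ≤ max_photons region is where the Python recurses forever).
def pvGenHelper (N max_photons : Int) : Nat → List Int → Int → List (List Int) → List (List Int)
  | 0, current_outcome, remaining_photons, outcomes =>
      if 0 ≤ remaining_photons then outcomes ++ [current_outcome] else outcomes
  | fuel+1, current_outcome, remaining_photons, outcomes =>
      (PySem.List.pyRange 0 (min (max_photons + 1) (remaining_photons + 1)) 1).foldl
        (fun acc photons_in_mode =>
          pvGenHelper N max_photons fuel (current_outcome ++ [photons_in_mode])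
            (remaining_photons - photons_in_mode) acc) outcomes

def generate_photon_outcomes (N : Int) (max_photons : Int) : List (List Int) :=
  pvGenHelper N max_photons N.toNat [] max_photons []

-- ===== PORT B =====
-- one level of the comprehension: extend every row by every admissible photon count
def pvExpand (max_photons : Int) (rows : List (List Int)) : List (List Int) :=
  rows.flatMap (fun t => (PySem.List.pyRange 0 (max_photons - t.sum + 1) 1).map (fun p => t ++ [p]))

-- 'for _ in range(N): if not rows: break; rows = …' (range(N) is empty for N ≤ 0)
def pvLevels (max_photons : Int) : Nat → List (List Int) → List (List Int)
  | 0, rows => rows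
  | n+1, rows => if rows = [] then rows else pvLevels max_photons n (pvExpand max_photons rows)

def generate_photon_outcomes_alt (N : Int) (max_photons : Int) : List (List Int) :=
  (pvLevels max_photons N.toNat [[]]).filter (fun t => decide (t.sum ≤ max_photons))

-- ===== PRECONDITION & SPEC =====
-- Pre_ excludes only N < 0 with 0 ≤ max_photons, where the Python A recurses without bound
-- (RecursionError); everywhere else A returns and B matches it.
def Pre_generate_photon_outcomes (N : Int) (max_photons : Int) : Prop := 0 ≤ N ∨ max_photons < 0
instance (N : Int) (max_photons : Int) : Decidable (Pre_generate_photon_outcomes N max_photons) := by unfold Pre_generate_photon_outcomes; infer_instance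
def pvWitness_generate_photon_outcomes : Int × Int := (3, 2)

def Spec_generate_photon_outcomes (N : Int) (max_photons : Int) (out : List (List Int)) : Prop := out = generate_photon_outcomes_alt N max_photons
instance (N : Int) (max_photons : Int) (out : List (List Int)) : Decidable (Spec_generate_photon_outcomes N max_photons out) := by unfold Spec_generate_photon_outcomes; infer_instance

-- ===== CLAIM (what is proved, stated in full; the proofs are below) =====
def Claim_equal_generate_photon_outcomes : Prop := ∀ (N : Int) (max_photons : Int), Dom_generate_photon_outcomes N max_photons → Pre_generate_photon_outcomes N max_photons → Spec_generate_photon_outcomes N max_photons (generate_photon_outcomes N max_photons)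

-- ===== LEMMAS AND PROOFS =====

-- the full (cons-built) grid of range(0, a)-tuples of length n, in lexicographic order
def pvGrid (a : Int) : Nat → List (List Int)
  | 0 => [[]]
  | n+1 => (PySem.List.pyRange 0 a 1).flatMap (fun x => (pvGrid a n).map (fun t => x :: t))

-- every tuple of the grid has nonnegative sum
lemma pvGrid_sum_nonneg (a : Int) (n : Nat) :
    ∀ t ∈ pvGrid a n, 0 ≤ t.sum := by
  induction n with
  | zero =>
    intro t ht
    simp [pvGrid] at ht
    simp [ht]
  | succ n ih =>
    intro t ht
    simp only [pvGrid, List.mem_flatMap, List.mem_map] at ht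
    obtain ⟨x, hx, u, hu, rfl⟩ := ht
    have hx0 : 0 ≤ x := (PySem.List.mem_pyRange_one.mp hx).1
    have := ih u hu
    simp only [List.sum_cons]
    omega

-- A-side loop invariant: the helper appends exactly the rem-filtered grid, prefixed by cur
lemma pvGenHelper_eq (N max_photons : Int) (fuel : Nat) :
    ∀ (cur : List Int) (rem : Int) (out : List (List Int)),
      pvGenHelper N max_photons fuel cur rem out =
        out ++ ((pvGrid (max_photons + 1) fuel).filter
            (fun t => decide (t.sum ≤ rem))).map (fun t => cur ++ t) := by
  induction fuel with
  | zero =>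
    intro cur rem out
    by_cases h : 0 ≤ rem <;>
      simp [pvGenHelper, pvGrid, h, List.filter]
  | succ n ih =>
    intro cur rem out
    have hstep :
        (fun (acc : List (List Int)) (x : Int) =>
            pvGenHelper N max_photons n (cur ++ [x]) (rem - x) acc) =
          fun acc x => acc ++
            ((pvGrid (max_photons + 1) n).filter
                (fun t => decide (t.sum ≤ rem - x))).map (fun t => (cur ++ [x]) ++ t) := by
      funext acc x; exact ih (cur ++ [x]) (rem - x) acc
    rw [pvGenHelper, hstep, PySem.List.foldl_append_eq_flatMap]
    congr 1
    set g : Int → List (List Int) := fun x =>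
      ((pvGrid (max_photons + 1) n).filter
          (fun t => decide (t.sum ≤ rem - x))).map (fun t => (cur ++ [x]) ++ t) with hg
    -- widen the truncated range: for x with rem < x the chunk is empty
    have hempty : ∀ x : Int, rem < x → g x = [] := by
      intro x hx
      rw [hg]
      simp only [List.map_eq_nil_iff, List.filter_eq_nil_iff]
      intro t ht
      have := pvGrid_sum_nonneg (max_photons + 1) n t ht
      simp only [decide_eq_true_eq]
      omega
    have hrange :
        (PySem.List.pyRange 0 (min (max_photons + 1) (rem + 1)) 1).flatMap g =
          (PySem.List.pyRange 0 (max_photons + 1) 1).flatMap g := by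
      by_cases h : max_photons + 1 ≤ rem + 1
      · rw [min_eq_left h]
      · rw [min_eq_right (by omega : rem + 1 ≤ max_photons + 1)]
        by_cases h0 : rem + 1 ≤ 0
        · rw [PySem.List.pyRange_one_eq_nil h0]
          simp only [List.flatMap_nil]
          symm
          rw [List.flatMap_eq_nil_iff]
          intro x hx
          exact hempty x (by have := (PySem.List.mem_pyRange_one.mp hx).1; omega)
        · rw [PySem.List.pyRange_one_append 0 (rem + 1) (max_photons + 1) (by omega) (by omega),
              List.flatMap_append]
          have : (PySem.List.pyRange (rem + 1) (max_photons + 1) 1).flatMap g = [] := by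
            rw [List.flatMap_eq_nil_iff]
            intro x hx
            exact hempty x (by have := (PySem.List.mem_pyRange_one.mp hx).1; omega)
          simp [this]
    rw [hrange]
    rw [show pvGrid (max_photons + 1) (n+1) =
        (PySem.List.pyRange 0 (max_photons + 1) 1).flatMap
          (fun x => (pvGrid (max_photons + 1) n).map (fun t => x :: t)) from rfl]
    rw [List.filter_flatMap, List.map_flatMap]
    congr 1
    funext x
    rw [hg]
    simp only [List.filter_map, List.map_map]
    congr 1
    · funext t
      simp [Function.comp]
    · apply List.filter_congr
      intro t _
      simp only [Function.comp, List.sum_cons, decide_eq_decide]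
      omega

-- the grid can also be built by extending tuples on the right
lemma pvGrid_succ_right (a : Int) (n : Nat) :
    pvGrid a (n+1) = (pvGrid a n).flatMap
      (fun t => (PySem.List.pyRange 0 a 1).map (fun x => t ++ [x])) := by
  induction n with
  | zero =>
    show (PySem.List.pyRange 0 a 1).flatMap (fun x => [[x]]) = _
    simp [pvGrid, ← List.map_eq_flatMap]
  | succ n ih =>
    rw [show pvGrid a (n+1+1) =
        (PySem.List.pyRange 0 a 1).flatMap (fun x => (pvGrid a (n+1)).map (fun t => x :: t)) from rfl]
    conv_lhs => rw [ih]
    rw [show pvGrid a (n+1) =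
        (PySem.List.pyRange 0 a 1).flatMap (fun x => (pvGrid a n).map (fun t => x :: t)) from rfl]
    simp only [List.map_flatMap, List.flatMap_map, List.flatMap_assoc, List.map_map]
    apply List.flatMap_congr
    intro x _
    apply List.flatMap_congr
    intro t _
    simp [Function.comp]

-- dropping rows that fail the filter does not change the expansion: they expand to nothing
lemma pvExpand_filter (m : Int) (rows : List (List Int)) :
    pvExpand m (rows.filter (fun t => decide (t.sum ≤ m))) = pvExpand m rows := by
  unfold pvExpand
  induction rows with
  | nil => rfl
  | cons t rows ih =>
    by_cases h : t.sum ≤ m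
    · rw [List.filter_cons_of_pos (by simpa using h), List.flatMap_cons, List.flatMap_cons, ih]
    · rw [List.filter_cons_of_neg (by simpa using h), List.flatMap_cons, ih]
      have hnil : PySem.List.pyRange 0 (m - t.sum + 1) 1 = [] :=
        PySem.List.pyRange_one_eq_nil (by omega)
      rw [hnil]
      simp

-- the truncated photon range is the filtered full range (for a nonnegative partial sum)
lemma pvRange_trunc (m s : Int) (hs : 0 ≤ s) :
    (PySem.List.pyRange 0 (m + 1) 1).filter (fun p => decide (s + p ≤ m)) =
      PySem.List.pyRange 0 (m - s + 1) 1 := by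
  by_cases h : m - s + 1 ≤ 0
  · rw [PySem.List.pyRange_one_eq_nil h, List.filter_eq_nil_iff]
    intro p hp
    have := (PySem.List.mem_pyRange_one.mp hp).1
    simp only [decide_eq_true_eq]
    omega
  · rw [PySem.List.pyRange_one_append 0 (m - s + 1) (m + 1) (by omega) (by omega),
        List.filter_append]
    have h1 : (PySem.List.pyRange 0 (m - s + 1) 1).filter (fun p => decide (s + p ≤ m)) =
        PySem.List.pyRange 0 (m - s + 1) 1 := by
      rw [List.filter_eq_self]
      intro p hp
      have := (PySem.List.mem_pyRange_one.mp hp).2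
      simp only [decide_eq_true_eq]
      omega
    have h2 : (PySem.List.pyRange (m - s + 1) (m + 1) 1).filter (fun p => decide (s + p ≤ m)) = [] := by
      rw [List.filter_eq_nil_iff]
      intro p hp
      have := (PySem.List.mem_pyRange_one.mp hp).1
      simp only [decide_eq_true_eq]
      omega
    rw [h1, h2, List.append_nil]

-- one expansion step of the filtered grid is the filtered next grid
lemma pvExpand_grid (m : Int) (k : Nat) :
    pvExpand m ((pvGrid (m + 1) k).filter (fun t => decide (t.sum ≤ m))) =
      (pvGrid (m + 1) (k+1)).filter (fun t => decide (t.sum ≤ m)) := by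
  rw [pvExpand_filter, pvGrid_succ_right, List.filter_flatMap]
  unfold pvExpand
  apply List.flatMap_congr
  intro t ht
  rw [List.filter_map]
  have : ((fun t => decide (t.sum ≤ m)) ∘ fun x => t ++ [x]) =
      fun p => decide (t.sum + p ≤ m) := by
    funext p
    simp [Function.comp, List.sum_append]
  rw [this, pvRange_trunc m t.sum (pvGrid_sum_nonneg (m + 1) k t ht)]

-- B-side loop invariant: after k levels, the filtered rows are the filtered grid of length k
lemma pvIter_eq (m : Int) (k : Nat) :
    ((List.range k).foldl (fun rows _ => pvExpand m rows) [[]]).filter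
        (fun t => decide (t.sum ≤ m)) =
      (pvGrid (m + 1) k).filter (fun t => decide (t.sum ≤ m)) := by
  induction k with
  | zero => rfl
  | succ k ih =>
    rw [List.range_succ, List.foldl_append, List.foldl_cons, List.foldl_nil]
    have : pvExpand m ((List.range k).foldl (fun rows _ => pvExpand m rows) [[]]) =
        (pvGrid (m + 1) (k+1)).filter (fun t => decide (t.sum ≤ m)) := by
      rw [← pvExpand_filter, ih, pvExpand_grid]
    rw [this, List.filter_filter]
    simp

-- the early break is sound: expanding the empty level stays empty
lemma pvLevels_eq (m : Int) : ∀ (n : Nat) (rows : List (List Int)),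
    pvLevels m n rows = (List.range n).foldl (fun r _ => pvExpand m r) rows := by
  intro n
  induction n with
  | zero => intro rows; rfl
  | succ n ih =>
    intro rows
    rw [pvLevels]
    by_cases h : rows = []
    · subst h
      rw [if_pos rfl]
      have : ∀ (l : List Nat), l.foldl (fun r (_ : Nat) => pvExpand m r) [] = [] := by
        intro l
        induction l with
        | nil => rfl
        | cons a l ihl => simpa [pvExpand] using ihl
      exact (this _).symm
    · rw [if_neg h, ih, List.range_succ_eq_map, List.foldl_cons, List.foldl_map]

-- ===== VERDICT (by name: the statement is the Claim_ definition above) =====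
theorem generate_photon_outcomes_spec : Claim_equal_generate_photon_outcomes := by
  intro N max_photons _ _
  unfold Spec_generate_photon_outcomes generate_photon_outcomes generate_photon_outcomes_alt
  rw [pvGenHelper_eq, pvLevels_eq, pvIter_eq]
  simp
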